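-- pv_equiv track=rewrite | github.com/nikhila29/10XAcademy | Python programs/cut_rope.py | cutRope
-- ===== SOURCE A (Python) =====
-- def cutRope(A):# 5 1 1 2 3 5--min=1 or len(A)=6
--     res=[]     # 5-1, 1-1, 1-1,2-1,3-1,5-1==4 0 0 1 2 4 =min=1 or len(A)=4 (min of 1 are 2 so reduce len(A) by 2)
--     n=len(A)    # 4-1, 1-1, 2-1, 4-1=3 0 1 3=min=1
--     A.sort()
--     count=1
--     for i in range(1,len(A)):
--         if A[i]==A[i-1]:
--             count+=1
--         else:
--             n-=count
--             res.append(n)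
--             count=1
--     return res
-- ===== SOURCE B (Python) =====
-- def cutRope(A):
--     # two-phase: build run-length table over sorted A (in-place sort), then suffix totals
--     A.sort()
--     counts = []
--     run = 0
--     prev = None
--     for x in A:
--         if run and x == prev:
--             run += 1
--         else:
--             if run:
--                 counts.append(run)
--             run = 1
--             prev = x
--     if run:
--         counts.append(run)
--     total = len(A)
--     res = []
--     for c in counts[:-1]:
--         total -= c
--         res.append(total)
--     return res
-- ===== Notes on version B (the rewrite author's own statement) =====
-- stated objective: alternative
-- what changed: A's single fused loop (sort, then one pass maintaining remaining count, current run and result together) is split into two phases: build an explicit run-length table over the sorted list, then a second pass turning all runs but the last into running remainders.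
import Mathlib
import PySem

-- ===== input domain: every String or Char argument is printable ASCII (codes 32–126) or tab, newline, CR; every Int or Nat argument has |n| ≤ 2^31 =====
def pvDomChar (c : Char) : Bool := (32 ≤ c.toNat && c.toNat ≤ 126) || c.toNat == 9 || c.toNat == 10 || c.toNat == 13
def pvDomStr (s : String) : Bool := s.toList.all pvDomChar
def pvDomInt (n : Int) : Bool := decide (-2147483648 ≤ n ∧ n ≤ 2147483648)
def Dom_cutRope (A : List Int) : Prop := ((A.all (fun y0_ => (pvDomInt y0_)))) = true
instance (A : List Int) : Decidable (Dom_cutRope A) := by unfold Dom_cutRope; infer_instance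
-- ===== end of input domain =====

-- B replaces A's fused sort-and-scan loop by two phases (run-length table, then suffix totals);
-- objective: alternative decomposition, same cost. Both Pythons sort the argument in place;
-- the equivalence proved here is about the RETURN value only (both perform the same mutation).

-- ===== PORT A =====
def cutRope (A : List Int) : List Int :=
  let n : Int := PySem.List.len A
  let s := PySem.List.sorted A (fun x => x) false
  let st := (PySem.List.pyRange 1 (PySem.List.len s) 1).foldl
    (fun (st : Int × Int × List Int) i =>
      if PySem.List.pyGetD s i 0 = PySem.List.pyGetD s (i - 1) 0 then
        (st.1, st.2.1 + 1, st.2.2)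
      else
        (st.1 - st.2.1, 1, st.2.2 ++ [st.1 - st.2.1]))
    (n, 1, ([] : List Int))
  st.2.2

-- ===== PORT B =====
def cutRope_alt (A : List Int) : List Int :=
  let s := PySem.List.sorted A (fun x => x) false
  let ph := s.foldl
    (fun (st : List Int × Int × Option Int) x =>
      if st.2.1 ≠ 0 ∧ some x = st.2.2 then
        (st.1, st.2.1 + 1, st.2.2)
      else
        ((if st.2.1 ≠ 0 then st.1 ++ [st.2.1] else st.1), 1, some x))
    (([] : List Int), (0 : Int), (none : Option Int))
  let counts := if ph.2.1 ≠ 0 then ph.1 ++ [ph.2.1] else ph.1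
  let total : Int := PySem.List.len s
  let fin := counts.dropLast.foldl
    (fun (st : Int × List Int) c => (st.1 - c, st.2 ++ [st.1 - c]))
    (total, ([] : List Int))
  fin.2

-- ===== PRECONDITION & SPEC =====
def Spec_cutRope (A : List Int) (out : List Int) : Prop := out = cutRope_alt A
instance (A : List Int) (out : List Int) : Decidable (Spec_cutRope A out) := by unfold Spec_cutRope; infer_instance

-- ===== CLAIM (what is proved, stated in full; the proofs are below) =====
def Claim_equal_cutRope : Prop := ∀ (A : List Int), Dom_cutRope A → Spec_cutRope A (cutRope A)

-- ===== LEMMAS AND PROOFS =====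

/-- run lengths of the list `p :: t`, current run `r` ending at `p`. -/
def runsAux (r : Int) (p : Int) : List Int → List Int
  | [] => [r]
  | x :: t => if x = p then runsAux (r + 1) x t else r :: runsAux 1 x t

/-- running remainders: `pref n [d₁, d₂, …] = [n-d₁, n-d₁-d₂, …]`. -/
def pref (n : Int) : List Int → List Int
  | [] => []
  | d :: ds => (n - d) :: pref (n - d) ds

theorem runsAux_ne_nil (r p : Int) (t : List Int) : runsAux r p t ≠ [] := by
  induction t generalizing r p with
  | nil => simp [runsAux]
  | cons x t ih => simp only [runsAux]; split <;> simp [ih]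

theorem zip_map_pyRange (s : List Int) :
    (PySem.List.pyRange 1 (PySem.List.len s) 1).map
      (fun i => (PySem.List.pyGetD s (i - 1) 0, PySem.List.pyGetD s i 0))
      = s.zip s.tail := by
  apply List.ext_getElem
  · simp [PySem.List.length_pyRange_one]
  · intro k h1 h2
    have hk : k < s.length - 1 := by
      simp [PySem.List.length_pyRange_one] at h1
      omega
    have hrange : (PySem.List.pyRange 1 (PySem.List.len s) 1)[k]'(by
        simp [PySem.List.length_pyRange_one]; omega) = 1 + (k : Int) :=
      PySem.List.getElem_pyRange_one ..
    simp only [List.getElem_map, hrange, List.getElem_zip]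
    have e1 : PySem.List.pyGetD s (1 + (k : Int) - 1) 0 = s[k]'(by omega) := by
      rw [PySem.List.pyGetD_eq_getElem s 0 (by omega) (by omega)]
      congr 1
      omega
    have e2 : PySem.List.pyGetD s (1 + (k : Int)) 0 = s[k + 1]'(by omega) := by
      rw [PySem.List.pyGetD_eq_getElem s 0 (by omega) (by omega)]
      congr 1
      omega
    rw [e1, e2]
    congr 1
    rw [List.getElem_tail]

theorem A_bridge (s : List Int) (st0 : Int × Int × List Int) :
    (PySem.List.pyRange 1 (PySem.List.len s) 1).foldl
      (fun (st : Int × Int × List Int) i =>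
        if PySem.List.pyGetD s i 0 = PySem.List.pyGetD s (i - 1) 0 then
          (st.1, st.2.1 + 1, st.2.2)
        else
          (st.1 - st.2.1, 1, st.2.2 ++ [st.1 - st.2.1])) st0
      = (s.zip s.tail).foldl
        (fun (st : Int × Int × List Int) (ab : Int × Int) =>
          if ab.2 = ab.1 then (st.1, st.2.1 + 1, st.2.2)
          else (st.1 - st.2.1, 1, st.2.2 ++ [st.1 - st.2.1])) st0 := by
  rw [← zip_map_pyRange s, List.foldl_map]

theorem A_zip (t : List Int) (p n c : Int) (res : List Int) :
    (((p :: t).zip t).foldl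
      (fun (st : Int × Int × List Int) (ab : Int × Int) =>
        if ab.2 = ab.1 then (st.1, st.2.1 + 1, st.2.2)
        else (st.1 - st.2.1, 1, st.2.2 ++ [st.1 - st.2.1]))
      (n, c, res)).2.2
      = res ++ pref n (runsAux c p t).dropLast := by
  induction t generalizing p n c res with
  | nil => simp [runsAux, pref]
  | cons x t ih =>
    simp only [List.zip_cons_cons, List.foldl_cons]
    by_cases h : x = p
    · rw [if_pos h]
      simp only [runsAux, if_pos h]
      exact ih x n (c + 1) res
    · rw [if_neg h]
      simp only [runsAux, if_neg h]
      rw [List.dropLast_cons_of_ne_nil (runsAux_ne_nil 1 x t)]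
      simp only [pref]
      rw [ih x (n - c) 1 (res ++ [n - c])]
      simp [List.append_assoc]

theorem B_ph1 (t : List Int) (p run : Int) (cs : List Int) (hrun : 1 ≤ run) :
    (if (t.foldl
      (fun (st : List Int × Int × Option Int) x =>
        if st.2.1 ≠ 0 ∧ some x = st.2.2 then
          (st.1, st.2.1 + 1, st.2.2)
        else
          ((if st.2.1 ≠ 0 then st.1 ++ [st.2.1] else st.1), 1, some x))
      (cs, run, some p)).2.1 ≠ 0 then
        (t.foldl
      (fun (st : List Int × Int × Option Int) x =>
        if st.2.1 ≠ 0 ∧ some x = st.2.2 then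
          (st.1, st.2.1 + 1, st.2.2)
        else
          ((if st.2.1 ≠ 0 then st.1 ++ [st.2.1] else st.1), 1, some x))
      (cs, run, some p)).1 ++ [(t.foldl
      (fun (st : List Int × Int × Option Int) x =>
        if st.2.1 ≠ 0 ∧ some x = st.2.2 then
          (st.1, st.2.1 + 1, st.2.2)
        else
          ((if st.2.1 ≠ 0 then st.1 ++ [st.2.1] else st.1), 1, some x))
      (cs, run, some p)).2.1]
      else (t.foldl
      (fun (st : List Int × Int × Option Int) x =>
        if st.2.1 ≠ 0 ∧ some x = st.2.2 then
          (st.1, st.2.1 + 1, st.2.2)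
        else
          ((if st.2.1 ≠ 0 then st.1 ++ [st.2.1] else st.1), 1, some x))
      (cs, run, some p)).1)
      = cs ++ runsAux run p t := by
  induction t generalizing p run cs with
  | nil =>
    simp only [List.foldl_nil, runsAux]
    rw [if_pos (by omega : run ≠ 0)]
  | cons x t ih =>
    simp only [List.foldl_cons]
    by_cases h : x = p
    · subst h
      rw [if_pos (⟨by omega, rfl⟩ : run ≠ 0 ∧ some x = some x)]
      simp only [runsAux]
      exact ih x (run + 1) cs (by omega)
    · rw [if_neg (by simp [h] : ¬(run ≠ 0 ∧ some x = some p))]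
      rw [if_pos (by omega : run ≠ 0)]
      rw [ih x 1 (cs ++ [run]) (by omega)]
      simp only [runsAux, if_neg h]
      simp [List.append_assoc]

theorem B_ph2 (ds : List Int) (tot : Int) (acc : List Int) :
    (ds.foldl (fun (st : Int × List Int) c => (st.1 - c, st.2 ++ [st.1 - c])) (tot, acc)).2
      = acc ++ pref tot ds := by
  induction ds generalizing tot acc with
  | nil => simp [pref]
  | cons d ds ih =>
    simp only [List.foldl_cons, pref]
    rw [ih (tot - d) (acc ++ [tot - d])]
    simp [List.append_assoc]

-- ===== VERDICT (by name: the statement is the Claim_ definition above) =====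
theorem cutRope_spec : Claim_equal_cutRope := by
  intro A _
  unfold Spec_cutRope
  cases hsplit : PySem.List.sorted A (fun x => x) false with
  | nil =>
    simp only [cutRope, cutRope_alt, hsplit]
    rw [PySem.List.pyRange_one_eq_nil (by simp)]
    simp
  | cons p t =>
    have hlen : ((p :: t).length : Int) = (A.length : Int) := by
      rw [← hsplit, PySem.List.length_sorted]
    simp only [cutRope, cutRope_alt, hsplit]
    rw [A_bridge (p :: t) (PySem.List.len A, 1, [])]
    rw [List.tail_cons]
    rw [A_zip t p (PySem.List.len A) 1 []]
    rw [List.foldl_cons]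
    rw [if_neg (by simp : ¬((0:Int) ≠ 0 ∧ some p = (none : Option Int)))]
    rw [if_neg (by simp : ¬((0:Int) ≠ 0))]
    rw [B_ph1 t p 1 [] (by omega)]
    rw [B_ph2]
    simp only [List.nil_append, PySem.List.len_eq]
    rw [hlen]
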